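-- pv_equiv track=rewrite | github.com/covap-utfpr/DocAI | ocr/Comparacao_Resultados/Modules/functions.py | comparar_consumindo
-- ===== SOURCE A (Python) =====
-- from collections import Counter
--
-- def comparar_consumindo(base, cupom):                       # Comparação entre o cupom travado de referencia e os demais
--     cupom_counter = Counter(cupom)                          # Contador de itens disponiveis no cupom
--     cupom_pool = cupom.copy()                               # Para mostrar visualmente o conteúdo consumido
--     contem = []                                             # Lista booleana: True se item encontrado
--     con_encontrado = []                                     # Lista do item encontrado (para visualização)
--     for item in base:                                       # Para cada item no cupom de referencia
--         if cupom_counter[item] > 0:                         # Se o item é encontrado no cupom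
--             contem.append(True)                             # Item presente → OK
--             con_encontrado.append(item)                     # Adiciona o item a con_encontrado
--             cupom_counter[item] -= 1                        # consome uma linha do contador
--             if item in cupom_pool:                          # Se o item ainda está no pool
--                 cupom_pool.remove(item)                     # Remove do pool visual
--         else:                                               # Se o item não é encontrado no cupom
--             contem.append(False)                            # Item ausente → ERR
--             if cupom_pool:                                  # Se ainda há itens no pool
--                 con_encontrado.append(cupom_pool.pop(0))    # Adiciona o próximo item do pool
--             else:                                           # Se o pool está vazio
--                 con_encontrado.append("")                   # Adiciona a string vazia
--     return contem, con_encontrado                           # retorna lista de booleanos e conteudo encontrado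
-- ===== SOURCE B (Python) =====
-- from collections import Counter
--
-- def comparar_consumindo(base, cupom):
--     # One pass with lazy deletions: the visual pool is represented by a head
--     # index into `cupom` plus a multiset `rem` of removals pending inside the
--     # suffix, instead of a list scanned/shifted on every step.
--     counts = Counter(cupom)            # consumable item counts
--     suff = Counter(cupom)              # multiset of cupom[head:]
--     rem = Counter()                    # lazy removals pending in the suffix
--     head = 0
--     n = len(cupom)
--     contem = []
--     con_encontrado = []
--     for item in base:
--         if counts[item] > 0:
--             contem.append(True)
--             con_encontrado.append(item)
--             counts[item] -= 1
--             if rem[item] < suff[item]:     # item still present in the pool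
--                 rem[item] += 1             # lazily remove its first occurrence
--         else:
--             contem.append(False)
--             while head < n and rem[cupom[head]] > 0:   # skip removed entries
--                 rem[cupom[head]] -= 1
--                 suff[cupom[head]] -= 1
--                 head += 1
--             if head < n:
--                 con_encontrado.append(cupom[head])
--                 suff[cupom[head]] -= 1
--                 head += 1
--             else:
--                 con_encontrado.append("")
--     return contem, con_encontrado
-- ===== Notes on version B (the rewrite author's own statement) =====
-- stated objective: faster
-- what changed: Replaces the list-based pool (O(m) membership test, remove and pop(0) per base item) with a head index into cupom plus Counter-based lazy deletions, so each base item is handled in amortized O(1).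
import Mathlib
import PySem

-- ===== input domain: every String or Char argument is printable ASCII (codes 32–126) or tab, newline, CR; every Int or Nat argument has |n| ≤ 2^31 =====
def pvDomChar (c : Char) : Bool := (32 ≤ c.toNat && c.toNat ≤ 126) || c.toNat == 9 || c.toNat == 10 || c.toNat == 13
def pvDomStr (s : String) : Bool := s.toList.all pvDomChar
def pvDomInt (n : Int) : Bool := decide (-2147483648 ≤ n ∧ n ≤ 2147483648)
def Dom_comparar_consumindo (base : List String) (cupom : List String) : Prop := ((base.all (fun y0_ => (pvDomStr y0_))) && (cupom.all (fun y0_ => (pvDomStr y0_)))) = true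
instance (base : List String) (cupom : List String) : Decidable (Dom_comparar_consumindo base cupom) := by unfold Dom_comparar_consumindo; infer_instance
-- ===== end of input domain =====

-- B replaces A's list pool (linear membership test / remove / pop(0) per base item) by a head
-- index into cupom plus Counter-based lazy deletions: same return value for every input.

-- ===== PORT A =====
def stepA : (PySem.Dict String Int × List String × List Bool × List String) → String →
    PySem.Dict String Int × List String × List Bool × List String
  | (cnt, pool, contem, con), item =>
    if cnt.getD item 0 > 0 then
      (cnt.modify item 0 (· - 1),
       if item ∈ pool then (PySem.List.remove? pool item).getD pool else pool,
       contem ++ [true], con ++ [item])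
    else
      match pool with
      | [] => (cnt, [], contem ++ [false], con ++ [""])
      | x :: rest => (cnt, rest, contem ++ [false], con ++ [x])

def comparar_consumindo (base : List String) (cupom : List String) : List Bool × List String :=
  let st := base.foldl stepA (PySem.Dict.counter cupom, cupom, [], [])
  (st.2.2.1, st.2.2.2)

-- ===== PORT B =====
-- the while loop of Source B: advance head past lazily-removed entries
def altSkip (cupom : List String) (head : Nat) (rem suff : PySem.Dict String Int) :
    Nat × PySem.Dict String Int × PySem.Dict String Int :=
  if h : head < cupom.length then
    if rem.getD cupom[head] 0 > 0 then
      altSkip cupom (head + 1) (rem.modify cupom[head] 0 (· - 1)) (suff.modify cupom[head] 0 (· - 1))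
    else (head, rem, suff)
  else (head, rem, suff)
termination_by cupom.length - head

def stepB (cupom : List String) :
    (PySem.Dict String Int × PySem.Dict String Int × PySem.Dict String Int × Nat × List Bool × List String) → String →
    PySem.Dict String Int × PySem.Dict String Int × PySem.Dict String Int × Nat × List Bool × List String
  | (counts, suff, rem, head, contem, con), item =>
    if counts.getD item 0 > 0 then
      (counts.modify item 0 (· - 1), suff,
       if rem.getD item 0 < suff.getD item 0 then rem.modify item 0 (· + 1) else rem,
       head, contem ++ [true], con ++ [item])
    else
      let r := altSkip cupom head rem suff
      if _h : r.1 < cupom.length then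
        (counts, r.2.2.modify cupom[r.1] 0 (· - 1), r.2.1, r.1 + 1,
         contem ++ [false], con ++ [cupom[r.1]])
      else
        (counts, r.2.2, r.2.1, r.1, contem ++ [false], con ++ [""])

def comparar_consumindo_alt (base : List String) (cupom : List String) : List Bool × List String :=
  let st := base.foldl (stepB cupom)
    (PySem.Dict.counter cupom, PySem.Dict.counter cupom, PySem.Dict.empty, 0, [], [])
  (st.2.2.2.2.1, st.2.2.2.2.2)

-- ===== PRECONDITION & SPEC =====
def Spec_comparar_consumindo (base : List String) (cupom : List String) (out : List Bool × List String) : Prop := out = comparar_consumindo_alt base cupom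
instance (base : List String) (cupom : List String) (out : List Bool × List String) : Decidable (Spec_comparar_consumindo base cupom out) := by unfold Spec_comparar_consumindo; infer_instance

-- ===== CLAIM (what is proved, stated in full; the proofs are below) =====
def Claim_equal_comparar_consumindo : Prop := ∀ (base : List String) (cupom : List String), Dom_comparar_consumindo base cupom → Spec_comparar_consumindo base cupom (comparar_consumindo base cupom)

-- ===== LEMMAS AND PROOFS =====

-- pointwise update of a count function
def upd (f : String → Int) (w : String) (d : Int) : String → Int := fun v => if v = w then d else f v

lemma upd_self (f : String → Int) (w : String) (d : Int) : upd f w d w = d := by simp [upd]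

lemma upd_of_ne (f : String → Int) (w : String) (d : Int) (v : String) (h : v ≠ w) :
    upd f w d v = f v := by simp [upd, h]

lemma upd_upd_self (f : String → Int) (w : String) (d e : Int) :
    upd (upd f w d) w e = upd f w e := by
  funext v; by_cases h : v = w <;> simp [upd, h]

lemma upd_eq_self (f : String → Int) (w : String) : upd f w (f w) = f := by
  funext v; by_cases h : v = w <;> simp [upd, h]

lemma upd_comm (f : String → Int) (w u : String) (d e : Int) (h : w ≠ u) :
    upd (upd f w d) u e = upd (upd f u e) w d := by
  funext v
  by_cases h1 : v = u
  · subst h1; rw [upd_self, upd_of_ne _ _ _ _ (Ne.symm h), upd_self]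
  · by_cases h2 : v = w
    · subst h2; rw [upd_of_ne _ _ _ _ h1, upd_self, upd_self]
    · rw [upd_of_ne _ _ _ _ h1, upd_of_ne _ _ _ _ h2,
        upd_of_ne _ _ _ _ h2, upd_of_ne _ _ _ _ h1]

-- translate a Dict.modify into an upd on the getD-view
lemma getD_modify_fun (d : PySem.Dict String Int) (x : String) (g : Int → Int) :
    (fun v => (d.modify x 0 g).getD v 0) = upd (fun v => d.getD v 0) x (g (d.getD x 0)) := by
  funext v
  rw [PySem.Dict.getD_modify]
  by_cases h : v = x <;> simp [upd, h]

-- the pool represented by a suffix together with pending lazy removals f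
def skipF (xs : List String) (f : String → Int) : List String :=
  match xs with
  | [] => []
  | x :: t => if f x > 0 then skipF t (upd f x (f x - 1)) else x :: skipF t f

lemma skipF_nonpos (xs : List String) (f : String → Int) (hf : ∀ v, f v ≤ 0) : skipF xs f = xs := by
  induction xs with
  | nil => rfl
  | cons x t ih =>
    have hx : ¬ f x > 0 := by have := hf x; omega
    simp only [skipF, if_neg hx, ih]

lemma upd_dec_nonneg (f : String → Int) (x : String) (hf : ∀ v, 0 ≤ f v) (hx : f x > 0) :
    ∀ u, 0 ≤ upd f x (f x - 1) u := by
  intro u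
  by_cases h : u = x
  · subst h; rw [upd_self]; omega
  · rw [upd_of_ne _ _ _ _ h]; exact hf u

lemma mem_skipF (xs : List String) : ∀ (f : String → Int), (∀ v, 0 ≤ f v) → ∀ v,
    (v ∈ skipF xs f ↔ f v < (xs.count v : Int)) := by
  induction xs with
  | nil =>
    intro f hf v
    have := hf v
    simp only [skipF, List.not_mem_nil, List.count_nil, false_iff, not_lt]
    exact_mod_cast this
  | cons x t ih =>
    intro f hf v
    by_cases hx : f x > 0
    · simp only [skipF, if_pos hx]
      rw [ih _ (upd_dec_nonneg f x hf hx) v]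
      by_cases hv : v = x
      · subst hv; rw [upd_self, List.count_cons_self]; push_cast; omega
      · have hcnt : List.count v (x :: t) = List.count v t := List.count_cons_of_ne (Ne.symm hv)
        rw [upd_of_ne _ _ _ _ hv, hcnt]
    · have hx0 : f x = 0 := by have := hf x; omega
      simp only [skipF, if_neg hx, List.mem_cons]
      by_cases hv : v = x
      · subst hv
        rw [List.count_cons_self]
        have h0 : (0:Int) ≤ (t.count v : Int) := by positivity
        constructor
        · intro _; rw [hx0]; push_cast; omega
        · intro _; left; rfl
      · have hcnt : List.count v (x :: t) = List.count v t := List.count_cons_of_ne (Ne.symm hv)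
        rw [hcnt, ← ih f hf v]
        simp [hv]

lemma erase_skipF (xs : List String) : ∀ (f : String → Int), (∀ v, 0 ≤ f v) → ∀ w,
    skipF xs (upd f w (f w + 1)) = (skipF xs f).erase w := by
  induction xs with
  | nil => intro f hf w; rfl
  | cons x t ih =>
    intro f hf w
    by_cases hxw : x = w
    · subst hxw
      have h1 : f x + 1 > 0 := by have := hf x; omega
      by_cases hx : f x > 0
      · simp only [skipF, upd_self, upd_upd_self, if_pos h1, if_pos hx,
          show f x + 1 - 1 = f x from by omega, upd_eq_self]
        have hrec := ih (upd f x (f x - 1)) (upd_dec_nonneg f x hf hx) x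
        rw [upd_self, upd_upd_self, show f x - 1 + 1 = f x from by omega, upd_eq_self] at hrec
        exact hrec
      · have hx0 : f x = 0 := by have := hf x; omega
        simp only [skipF, upd_self, upd_upd_self, if_pos h1, if_neg hx,
          show f x + 1 - 1 = f x from by omega, upd_eq_self, List.erase_cons_head]
    · have hfx : upd f w (f w + 1) x = f x := upd_of_ne _ _ _ _ hxw
      by_cases hx : f x > 0
      · have h1 : upd f w (f w + 1) x > 0 := by rw [hfx]; exact hx
        simp only [skipF, if_pos hx, hfx]
        have hcomm : upd (upd f w (f w + 1)) x (f x - 1)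
            = upd (upd f x (f x - 1)) w (upd f x (f x - 1) w + 1) := by
          rw [upd_of_ne f x (f x - 1) w (Ne.symm hxw),
            upd_comm f w x (f w + 1) (f x - 1) (Ne.symm hxw)]
        rw [hcomm, ih (upd f x (f x - 1)) (upd_dec_nonneg f x hf hx) w]
      · have h1 : ¬ upd f w (f w + 1) x > 0 := by rw [hfx]; exact hx
        simp only [skipF, if_neg hx, if_neg h1]
        rw [ih f hf w, List.erase_cons_tail (by simp [hxw])]

lemma altSkip_unfold (cupom : List String) (head : Nat) (rem suff : PySem.Dict String Int) :
    altSkip cupom head rem suff =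
    if h : head < cupom.length then
      (if rem.getD cupom[head] 0 > 0 then
        altSkip cupom (head + 1) (rem.modify cupom[head] 0 (· - 1)) (suff.modify cupom[head] 0 (· - 1))
      else (head, rem, suff))
    else (head, rem, suff) := by
  rw [altSkip]

lemma altSkip_spec (cupom : List String) : ∀ (n head : Nat) (rem suff : PySem.Dict String Int),
    cupom.length - head ≤ n → head ≤ cupom.length → (∀ v, 0 ≤ rem.getD v 0) →
    (∀ v, suff.getD v 0 = (((cupom.drop head).count v : Nat) : Int)) →
    (altSkip cupom head rem suff).1 ≤ cupom.length ∧
    (∀ v, 0 ≤ (altSkip cupom head rem suff).2.1.getD v 0) ∧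
    (∀ v, (altSkip cupom head rem suff).2.2.getD v 0
        = (((cupom.drop (altSkip cupom head rem suff).1).count v : Nat) : Int)) ∧
    skipF (cupom.drop (altSkip cupom head rem suff).1)
        (fun v => (altSkip cupom head rem suff).2.1.getD v 0)
      = skipF (cupom.drop head) (fun v => rem.getD v 0) ∧
    (∀ hlt : (altSkip cupom head rem suff).1 < cupom.length,
       (altSkip cupom head rem suff).2.1.getD (cupom[(altSkip cupom head rem suff).1]) 0 ≤ 0) := by
  intro n
  induction n with
  | zero =>
    intro head rem suff hfuel hle hnn hsuff
    have hh : ¬ head < cupom.length := by omega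
    rw [altSkip_unfold, dif_neg hh]
    exact ⟨hle, hnn, hsuff, rfl, fun hlt => absurd hlt hh⟩
  | succ n ih =>
    intro head rem suff hfuel hle hnn hsuff
    rw [altSkip_unfold]
    by_cases hh : head < cupom.length
    · rw [dif_pos hh]
      by_cases hx : rem.getD cupom[head] 0 > 0
      · rw [if_pos hx]
        have hdrop : cupom.drop head = cupom[head] :: cupom.drop (head + 1) :=
          List.drop_eq_getElem_cons hh
        have hnn' : ∀ v, 0 ≤ (rem.modify cupom[head] 0 (· - 1)).getD v 0 := by
          intro v
          rw [PySem.Dict.getD_modify]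
          by_cases h : v = cupom[head]
          · rw [if_pos h]; omega
          · rw [if_neg h]; exact hnn v
        have hsuff' : ∀ v, (suff.modify cupom[head] 0 (· - 1)).getD v 0
            = (((cupom.drop (head + 1)).count v : Nat) : Int) := by
          intro v
          rw [PySem.Dict.getD_modify]
          by_cases h : v = cupom[head]
          · subst h
            rw [if_pos rfl, hsuff _, hdrop, List.count_cons_self]
            push_cast; ring
          · have hcnt : List.count v (cupom[head] :: cupom.drop (head + 1))
                = List.count v (cupom.drop (head + 1)) := List.count_cons_of_ne (Ne.symm h)
            rw [if_neg h, hsuff v, hdrop, hcnt]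
        have hrec := ih (head + 1) _ _ (by omega) (by omega) hnn' hsuff'
        have hsk : skipF (cupom.drop head) (fun v => rem.getD v 0)
            = skipF (cupom.drop (head + 1)) (fun v => (rem.modify cupom[head] 0 (· - 1)).getD v 0) := by
          rw [hdrop]
          simp only [skipF]
          rw [if_pos hx, getD_modify_fun]
        rw [hsk]
        exact hrec
      · rw [if_neg hx]
        exact ⟨hle, hnn, hsuff, rfl, fun _ => not_lt.1 hx⟩
    · rw [dif_neg hh]
      exact ⟨hle, hnn, hsuff, rfl, fun hlt => absurd hlt hh⟩

lemma loop_eq (cupom : List String) : ∀ (base : List String) (cnt suff rem : PySem.Dict String Int)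
    (head : Nat) (contem : List Bool) (con : List String),
    head ≤ cupom.length → (∀ v, 0 ≤ rem.getD v 0) →
    (∀ v, suff.getD v 0 = (((cupom.drop head).count v : Nat) : Int)) →
    ((base.foldl stepA (cnt, skipF (cupom.drop head) (fun v => rem.getD v 0), contem, con)).2.2.1,
     (base.foldl stepA (cnt, skipF (cupom.drop head) (fun v => rem.getD v 0), contem, con)).2.2.2) =
    ((base.foldl (stepB cupom) (cnt, suff, rem, head, contem, con)).2.2.2.2.1,
     (base.foldl (stepB cupom) (cnt, suff, rem, head, contem, con)).2.2.2.2.2) := by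
  intro base
  induction base with
  | nil => intro cnt suff rem head contem con _ _ _; rfl
  | cons item bs ih =>
    intro cnt suff rem head contem con hle hnn hsuff
    simp only [List.foldl_cons]
    by_cases hc : cnt.getD item 0 > 0
    · have hmem : (item ∈ skipF (cupom.drop head) (fun v => rem.getD v 0))
          ↔ rem.getD item 0 < suff.getD item 0 := by
        rw [mem_skipF _ _ hnn item, hsuff item]
      by_cases hm : rem.getD item 0 < suff.getD item 0
      · have hmem' := hmem.mpr hm
        have hrm : PySem.List.remove? (skipF (cupom.drop head) fun v => rem.getD v 0) item
            = some ((skipF (cupom.drop head) fun v => rem.getD v 0).erase item) := by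
          first
          | exact PySem.List.remove?_eq_some_erase hmem'
          | exact PySem.List.remove?_eq_some_erase _ hmem'
          | exact PySem.List.remove?_eq_some_erase _ _ hmem'
        simp only [stepA, stepB, if_pos hc, if_pos hm, if_pos hmem', hrm, Option.getD_some]
        have hpool : (skipF (cupom.drop head) (fun v => rem.getD v 0)).erase item
            = skipF (cupom.drop head) (fun v => (rem.modify item 0 (· + 1)).getD v 0) := by
          rw [getD_modify_fun]
          exact (erase_skipF _ _ hnn item).symm
        rw [hpool]
        have hnn' : ∀ v, 0 ≤ (rem.modify item 0 (· + 1)).getD v 0 := by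
          intro v
          rw [PySem.Dict.getD_modify]
          by_cases h : v = item
          · rw [if_pos h]; have := hnn item; omega
          · rw [if_neg h]; exact hnn v
        exact ih _ suff _ head _ _ hle hnn' hsuff
      · have hmem' : ¬ (item ∈ skipF (cupom.drop head) (fun v => rem.getD v 0)) :=
          fun h => hm (hmem.mp h)
        simp only [stepA, stepB, if_pos hc, if_neg hm, if_neg hmem']
        exact ih _ suff rem head _ _ hle hnn hsuff
    · obtain ⟨h1, h2, h3, h4, h5⟩ :=
        altSkip_spec cupom cupom.length head rem suff (by omega) hle hnn hsuff
      set r := altSkip cupom head rem suff with hr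
      by_cases hlt : r.1 < cupom.length
      · have hdrop : cupom.drop r.1 = cupom[r.1] :: cupom.drop (r.1 + 1) :=
          List.drop_eq_getElem_cons hlt
        have hx0 : ¬ ((fun v => r.2.1.getD v 0) cupom[r.1] > 0) := by
          have := h5 hlt; simpa using by omega
        have hpool : skipF (cupom.drop head) (fun v => rem.getD v 0)
            = cupom[r.1] :: skipF (cupom.drop (r.1 + 1)) (fun v => r.2.1.getD v 0) := by
          rw [← h4, hdrop]
          simp only [skipF]
          rw [if_neg hx0]
        rw [hpool]
        simp only [stepA, stepB, if_neg hc, ← hr, dif_pos hlt]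
        have hsuff' : ∀ v, (r.2.2.modify cupom[r.1] 0 (· - 1)).getD v 0
            = (((cupom.drop (r.1 + 1)).count v : Nat) : Int) := by
          intro v
          rw [PySem.Dict.getD_modify]
          by_cases h : v = cupom[r.1]
          · subst h
            rw [if_pos rfl, h3 _, hdrop, List.count_cons_self]
            push_cast; ring
          · have hcnt : List.count v (cupom[r.1] :: cupom.drop (r.1 + 1))
                = List.count v (cupom.drop (r.1 + 1)) := List.count_cons_of_ne (Ne.symm h)
            rw [if_neg h, h3 v, hdrop, hcnt]
        exact ih _ _ _ _ _ _ (by omega) h2 hsuff'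
      · have hr1 : r.1 = cupom.length := by omega
        have hpool : skipF (cupom.drop head) (fun v => rem.getD v 0) = [] := by
          rw [← h4, hr1, List.drop_length]
          rfl
        rw [hpool]
        simp only [stepA, stepB, if_neg hc, ← hr, dif_neg hlt]
        have hpool2 : skipF (cupom.drop r.1) (fun v => r.2.1.getD v 0) = [] := by
          rw [hr1, List.drop_length]
          rfl
        have := ih cnt r.2.2 r.2.1 r.1 (contem ++ [false]) (con ++ [""]) h1 h2 h3
        rw [hpool2] at this
        exact this

-- ===== VERDICT (by name: the statement is the Claim_ definition above) =====
theorem comparar_consumindo_spec : Claim_equal_comparar_consumindo := by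
  intro base cupom _
  unfold Spec_comparar_consumindo comparar_consumindo comparar_consumindo_alt
  have h := loop_eq cupom base (PySem.Dict.counter cupom) (PySem.Dict.counter cupom)
    PySem.Dict.empty 0 [] []
    (Nat.zero_le _)
    (by intro v; simp [PySem.Dict.getD_empty])
    (by intro v; simp [PySem.Dict.getD_counter, List.drop_zero])
  rw [List.drop_zero, skipF_nonpos cupom _ (by intro v; simp [PySem.Dict.getD_empty])] at h
  exact h
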